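-- pv_equiv track=rewrite | github.com/myles1663/lancelot | src/business/skills/content_repurpose.py | generate_linkedin_posts
-- ===== SOURCE A (Python) =====
-- from typing import List
--
-- def generate_linkedin_posts(parsed_content: dict, count: int = 3) -> List[str]:
--     """Professional format, 200-500 words each."""
--     title = parsed_content.get("title", "Insights")
--     paragraphs = parsed_content.get("paragraphs", [])
--     topics = parsed_content.get("key_topics", [])
--     posts = []
--
--     for i in range(min(count, max(1, len(paragraphs)))):
--         hook = f"Here's something worth discussing about {topics[i] if i < len(topics) else 'this topic'}:\n\n"
--         body_paras = paragraphs[i * 2:(i + 1) * 2] if paragraphs else [title]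
--         body = "\n\n".join(body_paras)
--
--         # Pad to minimum 200 words
--         words = body.split()
--         while len(words) < 200:
--             body += f"\n\nThis connects to broader themes in {topics[0] if topics else 'business'} and {topics[1] if len(topics) > 1 else 'strategy'}. "
--             body += "Understanding these connections helps professionals make better decisions. "
--             body += "The key takeaway is that thoughtful analysis drives meaningful results. "
--             body += "Consider how this applies to your own work and professional development."
--             words = body.split()
--
--         # Trim to max 500 words
--         words = body.split()[:500]
--         body = " ".join(words)
--
--         post = f"{hook}{body}\n\n#ProfessionalDevelopment #Strategy"
--         posts.append(post)
--
--     return posts[:count]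
-- ===== SOURCE B (Python) =====
-- from typing import List
--
-- def _make_post(title, paragraphs, topics, i):
--     hook = f"Here's something worth discussing about {topics[i] if i < len(topics) else 'this topic'}:\n\n"
--     body = "\n\n".join(paragraphs[i * 2:(i + 1) * 2] if paragraphs else [title])
--     block = (
--         f"\n\nThis connects to broader themes in {topics[0] if topics else 'business'} and {topics[1] if len(topics) > 1 else 'strategy'}. "
--         "Understanding these connections helps professionals make better decisions. "
--         "The key takeaway is that thoughtful analysis drives meaningful results. "
--         "Consider how this applies to your own work and professional development."
--     )
--     w0 = len(body.split())
--     if w0 < 200: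
--         n = -(-(200 - w0) // len(block.split()))
--         body += block * n
--     body = " ".join(body.split()[:500])
--     return f"{hook}{body}\n\n#ProfessionalDevelopment #Strategy"
--
-- def generate_linkedin_posts(parsed_content: dict, count: int = 3) -> List[str]:
--     """Professional format, 200-500 words each."""
--     title = parsed_content.get("title", "Insights")
--     paragraphs = parsed_content.get("paragraphs", [])
--     topics = parsed_content.get("key_topics", [])
--     n_posts = min(count, max(1, len(paragraphs)))
--     return [_make_post(title, paragraphs, topics, i) for i in range(n_posts)][:count]
-- ===== Notes on version B (the rewrite author's own statement) =====
-- stated objective: simpler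
-- what changed: The word-count padding while-loop is replaced by a closed-form ceiling-division computation of how many pad blocks are needed (body + block * n in one step), and the outer accumulate-and-append loop becomes a per-post helper mapped over range.
import Mathlib
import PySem

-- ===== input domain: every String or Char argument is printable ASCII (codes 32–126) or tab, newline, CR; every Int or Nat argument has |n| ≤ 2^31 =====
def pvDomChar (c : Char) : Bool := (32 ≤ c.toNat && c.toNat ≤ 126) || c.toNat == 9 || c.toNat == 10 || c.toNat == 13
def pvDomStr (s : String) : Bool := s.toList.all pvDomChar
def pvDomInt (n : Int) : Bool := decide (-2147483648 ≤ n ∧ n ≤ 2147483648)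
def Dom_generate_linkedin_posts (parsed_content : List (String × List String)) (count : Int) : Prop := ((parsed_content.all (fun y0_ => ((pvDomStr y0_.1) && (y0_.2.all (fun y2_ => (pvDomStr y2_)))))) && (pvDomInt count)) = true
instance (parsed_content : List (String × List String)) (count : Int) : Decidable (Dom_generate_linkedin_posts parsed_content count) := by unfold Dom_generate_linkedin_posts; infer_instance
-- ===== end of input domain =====

-- B replaces A's word-count padding while-loop by a closed-form ceiling-division count of pad
-- blocks appended in one step, and maps a per-post helper over the range instead of
-- accumulating with append; same return value on all inputs admitted by Pre_.


-- ===== PORT A =====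
-- A's `while len(words) < 200: body += …` loop. Fuel 200 only makes the loop total: each pass
-- appends at least one word (the pad block always contains words), so at most 200 passes run.
def pvPadLoop : Nat → String → String → String
  | 0, body, _ => body
  | f + 1, body, block =>
    if (PySem.Str.split₀ body).length < 200 then pvPadLoop f (body ++ block) block else body

def generate_linkedin_posts (parsed_content : List (String × List String)) (count : Int) : List String :=
  let title? : Option (List String) := (parsed_content.find? (fun kv => kv.1 == "title")).map (·.2)
  let paragraphs : List String := ((parsed_content.find? (fun kv => kv.1 == "paragraphs")).map (·.2)).getD []
  let topics : List String := ((parsed_content.find? (fun kv => kv.1 == "key_topics")).map (·.2)).getD []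
  let posts : List String :=
    (PySem.List.pyRange 0 (min count (max 1 (paragraphs.length : Int))) 1).foldl (fun posts i =>
      let hook := "Here's something worth discussing about " ++
        (if i < (topics.length : Int) then (PySem.List.pyGet? topics i).getD "this topic" else "this topic") ++ ":\n\n"
      -- Python: `paragraphs[i*2:(i+1)*2] if paragraphs else [title]`; when "title" is PRESENT its
      -- value is a list of strings and `"\n\n".join([title])` raises TypeError — excluded by Pre_,
      -- the port joins that list's own strings there.
      let body_paras : List String :=
        if paragraphs.isEmpty then (match title? with | none => ["Insights"] | some t => t)
        else PySem.List.slice paragraphs (some (i * 2)) (some ((i + 1) * 2))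
      let body := PySem.Str.join "\n\n" body_paras
      let block := "\n\nThis connects to broader themes in " ++
        (if topics.isEmpty then "business" else (PySem.List.pyGet? topics 0).getD "business") ++
        " and " ++
        (if 1 < (topics.length : Int) then (PySem.List.pyGet? topics 1).getD "strategy" else "strategy") ++
        ". Understanding these connections helps professionals make better decisions. " ++
        "The key takeaway is that thoughtful analysis drives meaningful results. " ++
        "Consider how this applies to your own work and professional development."
      let body := pvPadLoop 200 body block
      let body := PySem.Str.join " " (PySem.List.slice (PySem.Str.split₀ body) none (some 500))
      posts ++ [hook ++ body ++ "\n\n#ProfessionalDevelopment #Strategy"]) []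
  PySem.List.slice posts none (some count)

-- ===== PORT B =====
-- Source B's `block * n` (only used with n ≥ 1)
def pvStrMul (s : String) (n : Int) : String :=
  if h : n ≤ 0 then "" else s ++ pvStrMul s (n - 1)
termination_by n.toNat
decreasing_by simp at h; omega

def pvMakePost (title? : Option (List String)) (paragraphs topics : List String) (i : Int) : String :=
  let hook := "Here's something worth discussing about " ++
    (if i < (topics.length : Int) then (PySem.List.pyGet? topics i).getD "this topic" else "this topic") ++ ":\n\n"
  let body := PySem.Str.join "\n\n"
    (if paragraphs.isEmpty then (match title? with | none => ["Insights"] | some t => t)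
     else PySem.List.slice paragraphs (some (i * 2)) (some ((i + 1) * 2)))
  let block := "\n\nThis connects to broader themes in " ++
    (if topics.isEmpty then "business" else (PySem.List.pyGet? topics 0).getD "business") ++
    " and " ++
    (if 1 < (topics.length : Int) then (PySem.List.pyGet? topics 1).getD "strategy" else "strategy") ++
    ". Understanding these connections helps professionals make better decisions. " ++
    "The key takeaway is that thoughtful analysis drives meaningful results. " ++
    "Consider how this applies to your own work and professional development."
  let w0 := (PySem.Str.split₀ body).length
  let body :=
    if (w0 : Int) < 200 then
      body ++ pvStrMul block (-(PySem.Int.floordiv (-(200 - (w0 : Int))) ((PySem.Str.split₀ block).length : Int)))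
    else body
  let body := PySem.Str.join " " (PySem.List.slice (PySem.Str.split₀ body) none (some 500))
  hook ++ body ++ "\n\n#ProfessionalDevelopment #Strategy"

def generate_linkedin_posts_alt (parsed_content : List (String × List String)) (count : Int) : List String :=
  let title? : Option (List String) := (parsed_content.find? (fun kv => kv.1 == "title")).map (·.2)
  let paragraphs : List String := ((parsed_content.find? (fun kv => kv.1 == "paragraphs")).map (·.2)).getD []
  let topics : List String := ((parsed_content.find? (fun kv => kv.1 == "key_topics")).map (·.2)).getD []
  let n_posts : Int := min count (max 1 (paragraphs.length : Int))
  PySem.List.slice ((PySem.List.pyRange 0 n_posts 1).map (pvMakePost title? paragraphs topics)) none (some count)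

-- ===== PRECONDITION & SPEC =====
-- Pre_ excludes exactly the inputs on which Python A raises TypeError: at least one post is
-- generated (count ≥ 1), the "paragraphs" entry is missing or empty, and a "title" entry is
-- present — there `"\n\n".join([title])` joins a list element and raises.
def Pre_generate_linkedin_posts (parsed_content : List (String × List String)) (count : Int) : Prop :=
  ¬ (1 ≤ count ∧ ((parsed_content.find? (fun kv => kv.1 == "title")).isSome) ∧
     (((parsed_content.find? (fun kv => kv.1 == "paragraphs")).map (·.2)).getD []) = [])
instance (parsed_content : List (String × List String)) (count : Int) : Decidable (Pre_generate_linkedin_posts parsed_content count) := by unfold Pre_generate_linkedin_posts; infer_instance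

def pvWitness_generate_linkedin_posts : (List (String × List String)) × Int :=
  ([("paragraphs", ["hello world"]), ("key_topics", ["growth"])], 1)

def Spec_generate_linkedin_posts (parsed_content : List (String × List String)) (count : Int) (out : List String) : Prop := out = generate_linkedin_posts_alt parsed_content count
instance (parsed_content : List (String × List String)) (count : Int) (out : List String) : Decidable (Spec_generate_linkedin_posts parsed_content count out) := by unfold Spec_generate_linkedin_posts; infer_instance

-- ===== CLAIM (what is proved, stated in full; the proofs are below) =====
def Claim_equal_generate_linkedin_posts : Prop := ∀ (parsed_content : List (String × List String)) (count : Int), Dom_generate_linkedin_posts parsed_content count → Pre_generate_linkedin_posts parsed_content count → Spec_generate_linkedin_posts parsed_content count (generate_linkedin_posts parsed_content count)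

-- ===== LEMMAS AND PROOFS =====

-- word count of a char list, Python `len(s.split())`
def pvWcl (l : List Char) : Nat := (PySem.Chars.split₀ l).length

-- pad blocks needed: the least n with w0 + n*W ≥ 200 (for 1 ≤ W)
def pvNeeded (w0 W : Nat) : Nat := if 200 ≤ w0 then 0 else (200 - w0 + (W - 1)) / W

lemma pv_go_acc (s cur : List Char) (acc : List (List Char)) :
    PySem.Chars.split₀.go s cur acc = acc.reverse ++ PySem.Chars.split₀.go s cur [] := by
  induction s generalizing cur acc with
  | nil =>
    by_cases hcur : cur.isEmpty = true <;> simp [PySem.Chars.split₀.go, hcur]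
  | cons c rest ih =>
    by_cases hc : PySem.Chars.isspace c = true
    · by_cases hcur : cur.isEmpty = true
      · rw [show PySem.Chars.split₀.go (c :: rest) cur acc = PySem.Chars.split₀.go rest [] acc from by
            simp [PySem.Chars.split₀.go, hc, hcur],
          show PySem.Chars.split₀.go (c :: rest) cur [] = PySem.Chars.split₀.go rest [] [] from by
            simp [PySem.Chars.split₀.go, hc, hcur]]
        exact ih [] acc
      · rw [show PySem.Chars.split₀.go (c :: rest) cur acc =
              PySem.Chars.split₀.go rest [] (cur.reverse :: acc) from by
            simp [PySem.Chars.split₀.go, hc, hcur],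
          show PySem.Chars.split₀.go (c :: rest) cur [] =
              PySem.Chars.split₀.go rest [] [cur.reverse] from by
            simp [PySem.Chars.split₀.go, hc, hcur]]
        rw [ih [] (cur.reverse :: acc), ih [] [cur.reverse]]
        simp
    · rw [show PySem.Chars.split₀.go (c :: rest) cur acc =
            PySem.Chars.split₀.go rest (c :: cur) acc from by
          simp [PySem.Chars.split₀.go, hc],
        show PySem.Chars.split₀.go (c :: rest) cur [] =
            PySem.Chars.split₀.go rest (c :: cur) [] from by
          simp [PySem.Chars.split₀.go, hc]]
      exact ih (c :: cur) acc

lemma pv_go_ws_append (b : List Char) (c : Char) (hc : PySem.Chars.isspace c = true)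
    (a cur : List Char) (acc : List (List Char)) :
    PySem.Chars.split₀.go (a ++ c :: b) cur acc =
      PySem.Chars.split₀.go a cur acc ++ PySem.Chars.split₀.go b [] [] := by
  induction a generalizing cur acc with
  | nil =>
    simp only [List.nil_append]
    by_cases hcur : cur.isEmpty = true
    · rw [show PySem.Chars.split₀.go (c :: b) cur acc = PySem.Chars.split₀.go b [] acc from by
          simp [PySem.Chars.split₀.go, hc, hcur],
        show PySem.Chars.split₀.go ([] : List Char) cur acc = acc.reverse from by
          simp [PySem.Chars.split₀.go, hcur]]
      exact pv_go_acc b [] acc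
    · rw [show PySem.Chars.split₀.go (c :: b) cur acc =
            PySem.Chars.split₀.go b [] (cur.reverse :: acc) from by
          simp [PySem.Chars.split₀.go, hc, hcur],
        show PySem.Chars.split₀.go ([] : List Char) cur acc = (cur.reverse :: acc).reverse from by
          simp [PySem.Chars.split₀.go, hcur]]
      rw [pv_go_acc b [] (cur.reverse :: acc)]
  | cons d a ih =>
    simp only [List.cons_append]
    by_cases hd : PySem.Chars.isspace d = true
    · by_cases hcur : cur.isEmpty = true
      · rw [show PySem.Chars.split₀.go (d :: (a ++ c :: b)) cur acc =
              PySem.Chars.split₀.go (a ++ c :: b) [] acc from by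
            simp [PySem.Chars.split₀.go, hd, hcur],
          show PySem.Chars.split₀.go (d :: a) cur acc = PySem.Chars.split₀.go a [] acc from by
            simp [PySem.Chars.split₀.go, hd, hcur]]
        exact ih [] acc
      · rw [show PySem.Chars.split₀.go (d :: (a ++ c :: b)) cur acc =
              PySem.Chars.split₀.go (a ++ c :: b) [] (cur.reverse :: acc) from by
            simp [PySem.Chars.split₀.go, hd, hcur],
          show PySem.Chars.split₀.go (d :: a) cur acc =
              PySem.Chars.split₀.go a [] (cur.reverse :: acc) from by
            simp [PySem.Chars.split₀.go, hd, hcur]]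
        exact ih [] (cur.reverse :: acc)
    · rw [show PySem.Chars.split₀.go (d :: (a ++ c :: b)) cur acc =
            PySem.Chars.split₀.go (a ++ c :: b) (d :: cur) acc from by
          simp [PySem.Chars.split₀.go, hd],
        show PySem.Chars.split₀.go (d :: a) cur acc =
            PySem.Chars.split₀.go a (d :: cur) acc from by
          simp [PySem.Chars.split₀.go, hd]]
      exact ih (d :: cur) acc

lemma pv_split_ws_append (a b : List Char) (c : Char) (hc : PySem.Chars.isspace c = true) :
    PySem.Chars.split₀ (a ++ c :: b) = PySem.Chars.split₀ a ++ PySem.Chars.split₀ b := by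
  simp only [PySem.Chars.split₀]
  exact pv_go_ws_append b c hc a [] []

lemma pv_split_ws_cons (b : List Char) (c : Char) (hc : PySem.Chars.isspace c = true) :
    PySem.Chars.split₀ (c :: b) = PySem.Chars.split₀ b := by
  have h := pv_split_ws_append [] b c hc
  simpa [PySem.Chars.split₀, PySem.Chars.split₀.go] using h

lemma pv_wcl_add (s : List Char) (c : Char) (cs : List Char) (hc : PySem.Chars.isspace c = true) :
    pvWcl (s ++ c :: cs) = pvWcl s + pvWcl (c :: cs) := by
  unfold pvWcl
  rw [pv_split_ws_append s cs c hc, pv_split_ws_cons cs c hc, List.length_append]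

lemma pv_strMul_zero (s : String) : pvStrMul s ((0 : Nat) : Int) = "" := by
  unfold pvStrMul; simp

lemma pv_strMul_succ (s : String) (k : Nat) :
    pvStrMul s ((k + 1 : Nat) : Int) = s ++ pvStrMul s (k : Int) := by
  rw [pvStrMul]
  have h : ¬ ((k + 1 : Nat) : Int) ≤ 0 := by push_cast; omega
  rw [dif_neg h]
  norm_num

lemma pv_needed_le (w0 W : Nat) (hW : 1 ≤ W) : pvNeeded w0 W ≤ 200 := by
  unfold pvNeeded
  split
  · omega
  · rw [Nat.div_le_iff_le_mul_add_pred hW]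
    have : 200 - w0 ≤ W * (200 - w0) := Nat.le_mul_of_pos_left _ hW
    omega

lemma pv_needed_step (w0 W : Nat) (hW : 1 ≤ W) (hw : w0 < 200) :
    pvNeeded w0 W = pvNeeded (w0 + W) W + 1 := by
  unfold pvNeeded
  rw [if_neg (by omega)]
  by_cases h2 : 200 ≤ w0 + W
  · rw [if_pos h2]
    have h1 : 1 * W ≤ 200 - w0 + (W - 1) := by omega
    have h3 : 200 - w0 + (W - 1) < (1 + 1) * W := by omega
    rw [Nat.div_eq_of_lt_le h1 h3]
  · rw [if_neg h2]
    have e1 : 200 - w0 + (W - 1) = (200 - (w0 + W) + (W - 1)) + W := by omega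
    rw [e1, Nat.add_div_right _ (by omega)]

lemma pv_formula_eq (w0 W : Nat) (hW : 1 ≤ W) (hw : w0 < 200) :
    -(PySem.Int.floordiv (-(200 - (w0 : Int))) (W : Int)) = (pvNeeded w0 W : Int) := by
  rw [PySem.Int.neg_floordiv_neg_eq_iff_of_pos (by exact_mod_cast hW)]
  unfold pvNeeded
  rw [if_neg (by omega)]
  have hdm := Nat.div_add_mod (200 - w0 + (W - 1)) W
  have hlt : (200 - w0 + (W - 1)) % W < W := Nat.mod_lt _ (by omega)
  have hq1 : 1 ≤ (200 - w0 + (W - 1)) / W := by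
    rw [Nat.le_div_iff_mul_le (by omega)]
    omega
  generalize hqe : (200 - w0 + (W - 1)) / W = q at hdm hq1 ⊢
  generalize hre : (200 - w0 + (W - 1)) % W = r at hdm hlt
  obtain ⟨q', rfl⟩ : ∃ q', q = q' + 1 := ⟨q - 1, by omega⟩
  have hdm2 : W * q' + W + r = 200 - w0 + (W - 1) := by
    rw [← hdm]; ring
  have hnat1 : W * q' < 200 - w0 := by
    generalize W * q' = m at hdm2 ⊢
    omega
  have hnat2 : 200 - w0 ≤ W * q' + W := by
    generalize W * q' = m at hdm2 ⊢
    omega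
  constructor
  · have e : ((↑(q' + 1) : Int) - 1) * (W : Int) = ((W * q' : Nat) : Int) := by push_cast; ring
    rw [e]
    have e2 : (200 : Int) - (w0 : Int) = ((200 - w0 : Nat) : Int) := by omega
    rw [e2]
    exact_mod_cast hnat1
  · have e : ((↑(q' + 1) : Int)) * (W : Int) = ((W * q' + W : Nat) : Int) := by push_cast; ring
    rw [e]
    have e2 : (200 : Int) - (w0 : Int) = ((200 - w0 : Nat) : Int) := by omega
    rw [e2]
    exact_mod_cast hnat2

lemma pv_pad_loop_eq (block : String) (c : Char) (cs : List Char)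
    (hb : block.toList = c :: cs) (hc : PySem.Chars.isspace c = true)
    (hW : 1 ≤ pvWcl block.toList)
    (f : Nat) (body : String)
    (hf : pvNeeded (pvWcl body.toList) (pvWcl block.toList) ≤ f) :
    pvPadLoop f body block =
      body ++ pvStrMul block ((pvNeeded (pvWcl body.toList) (pvWcl block.toList) : Nat) : Int) := by
  induction f generalizing body with
  | zero =>
    have h0 : pvNeeded (pvWcl body.toList) (pvWcl block.toList) = 0 := by omega
    rw [h0, pv_strMul_zero]
    simp [pvPadLoop]
  | succ f ih =>
    have hsplit : (PySem.Str.split₀ body).length = pvWcl body.toList := by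
      simp [PySem.Str.split₀, pvWcl]
    by_cases hw : pvWcl body.toList < 200
    · rw [pvPadLoop, hsplit, if_pos hw]
      have hwc : pvWcl (body ++ block).toList = pvWcl body.toList + pvWcl block.toList := by
        have h1 : (body ++ block).toList = body.toList ++ c :: cs := by simp [hb]
        rw [h1, pv_wcl_add body.toList c cs hc, ← hb]
      have hstep := pv_needed_step (pvWcl body.toList) (pvWcl block.toList) hW hw
      have hf' : pvNeeded (pvWcl (body ++ block).toList) (pvWcl block.toList) ≤ f := by
        rw [hwc]; omega
      rw [ih (body ++ block) hf', hwc]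
      have hpos : pvNeeded (pvWcl body.toList) (pvWcl block.toList) =
          pvNeeded (pvWcl body.toList + pvWcl block.toList) (pvWcl block.toList) + 1 := hstep
      rw [hpos, pv_strMul_succ, String.append_assoc]
    · rw [pvPadLoop, hsplit, if_neg hw]
      have h0 : pvNeeded (pvWcl body.toList) (pvWcl block.toList) = 0 := by
        unfold pvNeeded; rw [if_pos (by omega)]
      rw [h0, pv_strMul_zero]
      simp

-- the pad block always starts with '\n'
set_option maxRecDepth 8192 in
lemma pv_block_shape (x y : String) :
    ∃ cs, ("\n\nThis connects to broader themes in " ++ x ++ " and " ++ y ++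
      ". Understanding these connections helps professionals make better decisions. " ++
      "The key takeaway is that thoughtful analysis drives meaningful results. " ++
      "Consider how this applies to your own work and professional development.").toList = '\n' :: cs := by
  refine ⟨("\nThis connects to broader themes in ").toList ++ x.toList ++ (" and ").toList ++
    y.toList ++ (". Understanding these connections helps professionals make better decisions. ").toList ++
    ("The key takeaway is that thoughtful analysis drives meaningful results. ").toList ++
    ("Consider how this applies to your own work and professional development.").toList, ?_⟩
  have h : ("\n\nThis connects to broader themes in ").toList =
      '\n' :: ("\nThis connects to broader themes in ").toList := by decide
  simp [String.toList_append, h]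

-- and it always contains at least one word ("This"), whatever the topics are
set_option maxRecDepth 8192 in
lemma pv_block_words (x y : String) :
    1 ≤ (PySem.Str.split₀ ("\n\nThis connects to broader themes in " ++ x ++ " and " ++ y ++
      ". Understanding these connections helps professionals make better decisions. " ++
      "The key takeaway is that thoughtful analysis drives meaningful results. " ++
      "Consider how this applies to your own work and professional development.")).length := by
  have hsB : (PySem.Str.split₀ ("\n\nThis connects to broader themes in " ++ x ++ " and " ++ y ++
      ". Understanding these connections helps professionals make better decisions. " ++
      "The key takeaway is that thoughtful analysis drives meaningful results. " ++
      "Consider how this applies to your own work and professional development.")).length =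
      (PySem.Chars.split₀ ("\n\nThis connects to broader themes in " ++ x ++ " and " ++ y ++
      ". Understanding these connections helps professionals make better decisions. " ++
      "The key takeaway is that thoughtful analysis drives meaningful results. " ++
      "Consider how this applies to your own work and professional development.").toList).length := by
    simp [PySem.Str.split₀]
  rw [hsB]
  have hlit : ("\n\nThis connects to broader themes in ").toList =
      ("\n\nThis").toList ++ ' ' :: ("connects to broader themes in ").toList := by decide
  have hshape : ("\n\nThis connects to broader themes in " ++ x ++ " and " ++ y ++
      ". Understanding these connections helps professionals make better decisions. " ++
      "The key takeaway is that thoughtful analysis drives meaningful results. " ++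
      "Consider how this applies to your own work and professional development.").toList =
      ("\n\nThis").toList ++ ' ' :: (("connects to broader themes in ").toList ++
        (x.toList ++ ((" and ").toList ++ (y.toList ++
        ((". Understanding these connections helps professionals make better decisions. ").toList ++
        (("The key takeaway is that thoughtful analysis drives meaningful results. ").toList ++
        ("Consider how this applies to your own work and professional development.").toList)))))) := by
    simp [String.toList_append, hlit]
  rw [hshape, pv_split_ws_append _ _ ' ' (by decide), List.length_append]
  have h1 : (PySem.Chars.split₀ ("\n\nThis").toList).length = 1 := by decide
  omega

-- the whole pad phase: A's fuelled loop equals B's one-step closed form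
lemma pv_pad_main (body block : String) (c : Char) (cs : List Char)
    (hb : block.toList = c :: cs) (hc : PySem.Chars.isspace c = true)
    (hW : 1 ≤ (PySem.Str.split₀ block).length) :
    pvPadLoop 200 body block =
      (if (((PySem.Str.split₀ body).length : Nat) : Int) < 200 then
        body ++ pvStrMul block
          (-(PySem.Int.floordiv (-(200 - (((PySem.Str.split₀ body).length : Nat) : Int)))
            ((PySem.Str.split₀ block).length : Int)))
      else body) := by
  have hsb : (PySem.Str.split₀ body).length = pvWcl body.toList := by
    simp [PySem.Str.split₀, pvWcl]
  have hsB : (PySem.Str.split₀ block).length = pvWcl block.toList := by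
    simp [PySem.Str.split₀, pvWcl]
  have hW' : 1 ≤ pvWcl block.toList := by rw [← hsB]; exact hW
  have hf : pvNeeded (pvWcl body.toList) (pvWcl block.toList) ≤ 200 :=
    pv_needed_le _ _ hW'
  rw [pv_pad_loop_eq block c cs hb hc hW' 200 body hf]
  by_cases hw : pvWcl body.toList < 200
  · rw [if_pos (by rw [hsb]; exact_mod_cast hw)]
    congr 1
    congr 1
    rw [hsb, hsB]
    exact (pv_formula_eq _ _ hW' hw).symm
  · rw [if_neg (by rw [hsb]; omega)]
    have h0 : pvNeeded (pvWcl body.toList) (pvWcl block.toList) = 0 := by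
      unfold pvNeeded; rw [if_pos (by omega)]
    rw [h0, pv_strMul_zero]
    simp

lemma pv_foldl_append_map (g : Int → String) (R : List Int) (acc : List String) :
    R.foldl (fun posts i => posts ++ [g i]) acc = acc ++ R.map g := by
  induction R generalizing acc with
  | nil => simp
  | cons z zs ih => simp [ih]

-- pointwise: A's loop body produces exactly B's helper post
set_option maxRecDepth 40000 in
lemma pv_post_eq (title? : Option (List String)) (paragraphs topics : List String) (i : Int) :
    (let hook := "Here's something worth discussing about " ++
      (if i < (topics.length : Int) then (PySem.List.pyGet? topics i).getD "this topic" else "this topic") ++ ":\n\n"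
     let body_paras : List String :=
       if paragraphs.isEmpty then (match title? with | none => ["Insights"] | some t => t)
       else PySem.List.slice paragraphs (some (i * 2)) (some ((i + 1) * 2))
     let body := PySem.Str.join "\n\n" body_paras
     let block := "\n\nThis connects to broader themes in " ++
       (if topics.isEmpty then "business" else (PySem.List.pyGet? topics 0).getD "business") ++
       " and " ++
       (if 1 < (topics.length : Int) then (PySem.List.pyGet? topics 1).getD "strategy" else "strategy") ++
       ". Understanding these connections helps professionals make better decisions. " ++
       "The key takeaway is that thoughtful analysis drives meaningful results. " ++
       "Consider how this applies to your own work and professional development."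
     let body := pvPadLoop 200 body block
     let body := PySem.Str.join " " (PySem.List.slice (PySem.Str.split₀ body) none (some 500))
     hook ++ body ++ "\n\n#ProfessionalDevelopment #Strategy")
    = pvMakePost title? paragraphs topics i := by
  unfold pvMakePost
  dsimp only
  obtain ⟨cs, hcs⟩ := pv_block_shape
    (if topics.isEmpty then "business" else (PySem.List.pyGet? topics 0).getD "business")
    (if 1 < (topics.length : Int) then (PySem.List.pyGet? topics 1).getD "strategy" else "strategy")
  rw [pv_pad_main _ _ '\n' cs hcs (by decide) (pv_block_words _ _)]

-- ===== VERDICT (by name: the statement is the Claim_ definition above) =====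
set_option maxRecDepth 40000 in
set_option maxHeartbeats 2000000 in
theorem generate_linkedin_posts_spec : Claim_equal_generate_linkedin_posts := by
  intro parsed_content count _hdom _hpre
  unfold Spec_generate_linkedin_posts generate_linkedin_posts generate_linkedin_posts_alt
  dsimp only
  rw [pv_foldl_append_map]
  simp only [List.nil_append]
  exact congrArg (fun l => PySem.List.slice l none (some count))
    (List.map_congr_left (fun i _ => pv_post_eq _ _ _ i))
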